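-- pv_equiv track=rewrite | github.com/kcleal/fslr | fslr/filter_junk_from_fq.py | find_lower_case
-- ===== SOURCE A (Python) =====
-- def find_lower_case(s):
--     i = 0
--     while i < len(s):
--         if s[i].islower():
--             end = i + 1
--             for j in range(end, len(s)):
--                 if not s[j].islower():
--                     break
--                 end += 1
--             yield i, end
--             i = end
--         else:
--             i += 1
-- ===== SOURCE B (Python) =====
-- def find_lower_case(s):
--     start = None
--     for i, c in enumerate(s):
--         if c.islower():
--             if start is None:
--                 start = i
--         elif start is not None:
--             yield start, i
--             start = None
--     if start is not None:
--         yield start, len(s)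
-- ===== Notes on version B (the rewrite author's own statement) =====
-- stated objective: simpler
-- what changed: Replaced the outer while loop with an inner lookahead for-loop and index jumping by a single flat enumerate pass with one Optional start state that flushes a run when it ends (and once after the loop).
import Mathlib
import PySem

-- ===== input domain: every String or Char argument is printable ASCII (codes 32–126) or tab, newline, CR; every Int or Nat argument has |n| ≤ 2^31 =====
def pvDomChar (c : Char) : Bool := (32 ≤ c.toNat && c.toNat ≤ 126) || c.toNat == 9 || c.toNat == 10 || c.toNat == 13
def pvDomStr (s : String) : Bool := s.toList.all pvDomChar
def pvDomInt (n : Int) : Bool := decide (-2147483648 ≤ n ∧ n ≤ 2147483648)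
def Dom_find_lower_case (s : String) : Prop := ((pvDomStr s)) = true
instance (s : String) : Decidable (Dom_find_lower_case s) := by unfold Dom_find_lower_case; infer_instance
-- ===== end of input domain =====

-- B replaces A's outer while loop with inner lookahead scan by one flat pass with an
-- Optional start state (objective: simpler).

-- ===== PORT A =====
-- inner 'for j in range(end, len(s)): if not s[j].islower(): break; end += 1'
-- (end tracks j, so the loop returns the first non-lowercase index ≥ e, or len)
def pvInnerA (cs : List Char) (e : Nat) : Nat :=
  if h : e < cs.length then
    if PySem.Chars.islower cs[e] then pvInnerA cs (e + 1) else e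
  else e
termination_by cs.length - e

theorem pvInnerA_ge (cs : List Char) (e : Nat) : e ≤ pvInnerA cs e := by
  fun_induction pvInnerA cs e with
  | case1 e h hl ih => omega
  | case2 => omega
  | case3 => omega

-- outer 'while i < len(s)'
def pvGoA (cs : List Char) (i : Nat) : List (Int × Int) :=
  if h : i < cs.length then
    if PySem.Chars.islower cs[i] then
      let e := pvInnerA cs (i + 1)
      ((i : Int), (e : Int)) :: pvGoA cs e
    else
      pvGoA cs (i + 1)
  else []
termination_by cs.length - i
decreasing_by
  · have := pvInnerA_ge cs (i + 1); omega
  · omega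

def find_lower_case (s : String) : List (Int × Int) := pvGoA s.toList 0

-- ===== PORT B =====
-- single pass: i is the current index, start the pending run's first index (None = no run)
def pvGoB (cs : List Char) (i : Nat) (start : Option Nat) : List (Int × Int) :=
  match cs with
  | [] =>
      match start with
      | none => []
      | some st => [((st : Int), (i : Int))]
  | c :: rest =>
      if PySem.Chars.islower c then
        match start with
        | none => pvGoB rest (i + 1) (some i)
        | some _ => pvGoB rest (i + 1) start
      else
        match start with
        | none => pvGoB rest (i + 1) none
        | some st => ((st : Int), (i : Int)) :: pvGoB rest (i + 1) none

def find_lower_case_alt (s : String) : List (Int × Int) := pvGoB s.toList 0 none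

-- ===== PRECONDITION & SPEC =====
def Spec_find_lower_case (s : String) (out : List (Int × Int)) : Prop := out = find_lower_case_alt s
instance (s : String) (out : List (Int × Int)) : Decidable (Spec_find_lower_case s out) := by unfold Spec_find_lower_case; infer_instance

-- ===== CLAIM (what is proved, stated in full; the proofs are below) =====
def Claim_equal_find_lower_case : Prop := ∀ (s : String), Dom_find_lower_case s → Spec_find_lower_case s (find_lower_case s)

-- ===== LEMMAS AND PROOFS =====

theorem pvInnerA_le (cs : List Char) (e : Nat) (he : e ≤ cs.length) :
    pvInnerA cs e ≤ cs.length := by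
  fun_induction pvInnerA cs e with
  | case1 e h hl ih => exact ih (by omega)
  | case2 e h hl => omega
  | case3 e h => omega

-- while 'start' is open at index j, B emits (st, pvInnerA cs j) and continues closed from there
theorem pvGoB_some (cs : List Char) (j : Nat) (st : Nat) (hj : j ≤ cs.length) :
    pvGoB (cs.drop j) j (some st) =
      ((st : Int), ((pvInnerA cs j : Nat) : Int)) :: pvGoB (cs.drop (pvInnerA cs j)) (pvInnerA cs j) none := by
  fun_induction pvInnerA cs j with
  | case1 j h hl ih =>
      rw [List.drop_eq_getElem_cons h]
      simp only [pvGoB, hl, if_pos]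
      exact ih (by omega)
  | case2 j h hl =>
      rw [List.drop_eq_getElem_cons h]
      simp only [pvGoB, hl]
      simp
  | case3 j h =>
      have hlen : j = cs.length := by omega
      simp [hlen, pvGoB]

theorem pvGoA_eq_pvGoB (cs : List Char) (i : Nat) (hi : i ≤ cs.length) :
    pvGoA cs i = pvGoB (cs.drop i) i none := by
  fun_induction pvGoA cs i with
  | case1 i h hl e ih =>
      rw [List.drop_eq_getElem_cons h]
      simp only [pvGoB, hl, if_pos]
      rw [pvGoB_some cs (i + 1) i (by omega)]
      have hle : pvInnerA cs (i + 1) ≤ cs.length := pvInnerA_le cs (i + 1) (by omega)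
      rw [← ih hle]
  | case2 i h hl ih =>
      rw [List.drop_eq_getElem_cons h]
      simp only [pvGoB, hl]
      exact ih (by omega)
  | case3 i h =>
      have hlen : i = cs.length := by omega
      subst hlen
      simp [pvGoB]

-- ===== VERDICT (by name: the statement is the Claim_ definition above) =====
theorem find_lower_case_spec : Claim_equal_find_lower_case := by
  intro s _
  unfold Spec_find_lower_case find_lower_case find_lower_case_alt
  simpa using pvGoA_eq_pvGoB s.toList 0 (by omega)
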